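-- pv_equiv track=rewrite | github.com/poilvert/toolbox | quantum-espresso/parse_cp_output.py | find_matching_lines_idx_for_patterns
-- ===== SOURCE A (Python) =====
-- def find_matching_lines_idx_for_patterns(lines, patterns):
--     """Given a list of line strings, patterns are searched within these lines.
--     For all the lines containing *all* of the patterns, we keep track of their
--     index (i.e. the index of that line in the list).
--     """
--     found_indices = []
--     for idx, line in enumerate(lines):
--         select_line = True
--         for pattern in patterns:
--             if pattern not in line:
--                 select_line = False
--                 break
--         if select_line:
--             found_indices += [idx]
--     return found_indices
-- ===== SOURCE B (Python) =====
-- def find_matching_lines_idx_for_patterns(lines, patterns):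
--     candidates = list(range(len(lines)))
--     for pattern in patterns:
--         candidates = [i for i in candidates if pattern in lines[i]]
--     return candidates
-- ===== Notes on version B (the rewrite author's own statement) =====
-- stated objective: alternative
-- what changed: Loops are transposed: instead of testing all patterns per line with a break, B maintains a candidate index list (initially all indices) and narrows it once per pattern.
import Mathlib
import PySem

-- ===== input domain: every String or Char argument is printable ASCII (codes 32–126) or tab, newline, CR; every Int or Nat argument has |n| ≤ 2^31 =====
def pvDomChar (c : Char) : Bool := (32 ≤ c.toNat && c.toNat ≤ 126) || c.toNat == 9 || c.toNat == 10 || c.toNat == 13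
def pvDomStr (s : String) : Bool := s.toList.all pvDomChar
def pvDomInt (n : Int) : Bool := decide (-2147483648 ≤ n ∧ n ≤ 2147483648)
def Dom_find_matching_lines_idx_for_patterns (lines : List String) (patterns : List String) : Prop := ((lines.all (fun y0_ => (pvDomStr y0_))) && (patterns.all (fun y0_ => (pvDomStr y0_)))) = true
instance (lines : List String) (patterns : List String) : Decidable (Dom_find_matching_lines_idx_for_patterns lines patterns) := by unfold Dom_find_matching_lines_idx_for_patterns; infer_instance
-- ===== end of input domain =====

-- B transposes the loops: a candidate index list is narrowed by one filter pass per pattern (alternative decomposition, same result).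


-- ===== PORT A =====
-- the inner 'for pattern in patterns: if pattern not in line: select_line = False; break' loop
def pvSelectLine (patterns : List String) (line : String) : Bool :=
  match patterns with
  | [] => true
  | p :: rest => if PySem.Str.isIn p line = false then false else pvSelectLine rest line

def find_matching_lines_idx_for_patterns (lines : List String) (patterns : List String) : List Int :=
  (PySem.List.enumerate lines 0).foldl
    (fun found_indices il =>
      if pvSelectLine patterns il.2 then found_indices ++ [il.1] else found_indices) []

-- ===== PORT B =====
def find_matching_lines_idx_for_patterns_alt (lines : List String) (patterns : List String) : List Int :=
  patterns.foldl
    (fun candidates pattern =>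
      candidates.filter (fun i => PySem.Str.isIn pattern (PySem.List.pyGetD lines i "")))
    (PySem.List.pyRange 0 lines.length 1)

-- ===== PRECONDITION & SPEC =====
def Spec_find_matching_lines_idx_for_patterns (lines : List String) (patterns : List String) (out : List Int) : Prop := out = find_matching_lines_idx_for_patterns_alt lines patterns
instance (lines : List String) (patterns : List String) (out : List Int) : Decidable (Spec_find_matching_lines_idx_for_patterns lines patterns out) := by unfold Spec_find_matching_lines_idx_for_patterns; infer_instance

-- ===== CLAIM (what is proved, stated in full; the proofs are below) =====
def Claim_equal_find_matching_lines_idx_for_patterns : Prop := ∀ (lines : List String) (patterns : List String), Dom_find_matching_lines_idx_for_patterns lines patterns → Spec_find_matching_lines_idx_for_patterns lines patterns (find_matching_lines_idx_for_patterns lines patterns)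

-- ===== LEMMAS AND PROOFS =====

-- the break loop computes the conjunction of the membership tests
lemma pvSelectLine_eq_all (patterns : List String) (line : String) :
    pvSelectLine patterns line = patterns.all (fun p => PySem.Str.isIn p line) := by
  induction patterns with
  | nil => rfl
  | cons p rest ih =>
      cases h : PySem.Str.isIn p line <;> simp [pvSelectLine, List.all_cons, ih]

-- iterated narrowing by one pattern at a time = one filter by the conjunction
lemma pvFoldl_filter_eq_filter_all (patterns : List String) (f : String → Int → Bool)
    (cands : List Int) :
    patterns.foldl (fun c p => c.filter (fun i => f p i)) cands
      = cands.filter (fun i => patterns.all (fun p => f p i)) := by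
  induction patterns generalizing cands with
  | nil => simp
  | cons p rest ih =>
      simp only [List.foldl_cons, ih, List.filter_filter]
      congr 1
      funext i
      cases h : f p i <;> simp [h, List.all_cons]

theorem pv_main (lines patterns : List String) :
    find_matching_lines_idx_for_patterns lines patterns
      = find_matching_lines_idx_for_patterns_alt lines patterns := by
  unfold find_matching_lines_idx_for_patterns find_matching_lines_idx_for_patterns_alt
  rw [PySem.List.foldl_append_if (fun il : Int × String => pvSelectLine patterns il.2)
        (fun il : Int × String => il.1) (PySem.List.enumerate lines) [],
      PySem.List.enumerate_eq_map_pyRange lines "", pvFoldl_filter_eq_filter_all,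
      List.filter_map, List.map_map]
  simp [Function.comp_def, pvSelectLine_eq_all]

-- ===== VERDICT (by name: the statement is the Claim_ definition above) =====
theorem find_matching_lines_idx_for_patterns_spec : Claim_equal_find_matching_lines_idx_for_patterns := by
  intro lines patterns _
  exact pv_main lines patterns
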